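-- pv_equiv track=rewrite | github.com/AmandaBirmingham/C-VIEW-Currents | src/freyja_processing_utils.py | _get_lineage_from_alias
-- ===== SOURCE A (Python) =====
-- LINEAGE_LABEL_DELIMITER = "."
--
-- def _get_lineage_from_alias(an_alias, lineage_to_parent_dict):
--     alias_pieces = an_alias.split(LINEAGE_LABEL_DELIMITER)
--     lineage_suffix = alias_pieces[-1]
--     if len(alias_pieces) == 1:
--         # NB: stopping when at something with no dots, even if that thing might
--         # have a parent--e.g., stopping when an_alias is B, even though B
--         # technically has a parent (which is A)
--         return an_alias
--
--     if an_alias in lineage_to_parent_dict: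
--         alias_parent = lineage_to_parent_dict.get(an_alias)
--         if not alias_parent:
--             return an_alias
--     else:  # if not in lineage_to_parent_dict
--         alias_parent = LINEAGE_LABEL_DELIMITER.join(alias_pieces[:-1])
--     # end if alias is/is not in lineage_to_parent_dict
--
--     parent_lineage = _get_lineage_from_alias(
--         alias_parent, lineage_to_parent_dict)
--     a_lineage = LINEAGE_LABEL_DELIMITER.join([parent_lineage, lineage_suffix])
--     return a_lineage
-- ===== SOURCE B (Python) =====
-- LINEAGE_LABEL_DELIMITER = "."
--
--
-- def _get_lineage_from_alias(an_alias, lineage_to_parent_dict):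
--     # Iterative rewrite: walk up the parent chain collecting suffixes,
--     # then join base + reversed suffixes once at the end.
--     suffixes = []
--     current = an_alias
--     while True:
--         pieces = current.split(LINEAGE_LABEL_DELIMITER)
--         if len(pieces) == 1:
--             break
--         if current in lineage_to_parent_dict and \
--                 not lineage_to_parent_dict[current]:
--             break
--         suffixes.append(pieces[-1])
--         if current in lineage_to_parent_dict:
--             current = lineage_to_parent_dict[current]
--         else:
--             current = LINEAGE_LABEL_DELIMITER.join(pieces[:-1])
--     return LINEAGE_LABEL_DELIMITER.join([current] + suffixes[::-1])
-- ===== Notes on version B (the rewrite author's own statement) =====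
-- stated objective: alternative
-- what changed: Replaced A's recursion (which rebuilds the lineage by nested joins on the way back up) with an explicit upward loop that collects suffixes in a list and performs a single join of base plus reversed suffixes at the end.
import Mathlib
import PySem

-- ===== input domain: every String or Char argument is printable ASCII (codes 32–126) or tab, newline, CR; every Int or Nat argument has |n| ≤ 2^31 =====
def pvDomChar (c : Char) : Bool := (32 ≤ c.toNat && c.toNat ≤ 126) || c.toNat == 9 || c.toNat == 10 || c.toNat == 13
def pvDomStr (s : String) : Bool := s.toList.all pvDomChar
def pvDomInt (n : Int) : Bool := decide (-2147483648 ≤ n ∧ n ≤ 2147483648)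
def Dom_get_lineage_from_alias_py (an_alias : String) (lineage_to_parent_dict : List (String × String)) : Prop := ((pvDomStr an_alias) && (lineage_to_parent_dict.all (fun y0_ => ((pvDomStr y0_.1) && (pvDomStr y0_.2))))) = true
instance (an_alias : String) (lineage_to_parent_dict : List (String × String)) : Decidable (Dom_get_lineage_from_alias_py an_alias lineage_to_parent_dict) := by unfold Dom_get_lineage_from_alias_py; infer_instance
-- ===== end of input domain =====

-- B replaces A's recursion by an explicit upward loop that collects suffixes and joins once at the end (objective: alternative decomposition, same cost); on cyclic parent chains (outside Pre_) Python A raises RecursionError and Python B does not terminate.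


-- ===== PORT A =====
-- Recursive helper of A, with a fuel guard making the recursion total
-- (fuel 0 returns ""; under Pre_ the fuel is never exhausted, see Pre_'s comment).
def pvAgo (lineage_to_parent_dict : List (String × String)) : Nat → String → String
  | 0, _ => ""
  | fuel + 1, an_alias =>
    let alias_pieces := (PySem.Str.split? an_alias ".").getD []
    let lineage_suffix := PySem.List.pyGetD alias_pieces (-1) ""
    if alias_pieces.length = 1 then
      an_alias
    else
      let d := PySem.Dict.mk lineage_to_parent_dict
      if d.contains an_alias then
        let alias_parent := (d.get? an_alias).getD ""
        if alias_parent = "" then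
          an_alias
        else
          PySem.Str.join "." [pvAgo lineage_to_parent_dict fuel alias_parent, lineage_suffix]
      else
        let alias_parent := PySem.Str.join "." (PySem.List.slice alias_pieces none (some (-1)))
        PySem.Str.join "." [pvAgo lineage_to_parent_dict fuel alias_parent, lineage_suffix]

def get_lineage_from_alias_py (an_alias : String) (lineage_to_parent_dict : List (String × String)) : String :=
  pvAgo lineage_to_parent_dict (PySem.Str.count an_alias "." + 1 + lineage_to_parent_dict.foldl (fun acc p => acc + PySem.Str.count p.2 "." + 1) 0) an_alias

-- ===== PORT B =====
-- Loop of B: returns (base, collected suffixes); same fuel guard as A's port.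
def pvBloop (lineage_to_parent_dict : List (String × String)) : Nat → String → List String → String × List String
  | 0, _, suffixes => ("", suffixes)
  | fuel + 1, current, suffixes =>
    let pieces := (PySem.Str.split? current ".").getD []
    if pieces.length = 1 then
      (current, suffixes)
    else
      let d := PySem.Dict.mk lineage_to_parent_dict
      if d.contains current ∧ (d.get? current).getD "" = "" then
        (current, suffixes)
      else
        let suffixes' := suffixes ++ [PySem.List.pyGetD pieces (-1) ""]
        let current' :=
          if d.contains current then (d.get? current).getD ""
          else PySem.Str.join "." (PySem.List.slice pieces none (some (-1)))
        pvBloop lineage_to_parent_dict fuel current' suffixes'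

def get_lineage_from_alias_py_alt (an_alias : String) (lineage_to_parent_dict : List (String × String)) : String :=
  let r := pvBloop lineage_to_parent_dict (PySem.Str.count an_alias "." + 1 + lineage_to_parent_dict.foldl (fun acc p => acc + PySem.Str.count p.2 "." + 1) 0) an_alias []
  PySem.Str.join "." (r.1 :: (PySem.List.slice? r.2 none none (-1)).getD [])

-- ===== PRECONDITION & SPEC =====
-- Helpers for Pre_: the multi-piece dotted prefixes of a string (itself first, shortest
-- two-piece prefix last) and the derived "next reached parent key" map of the dict.
def pvPrefixes (s : String) : List String :=
  let pieces := (PySem.Str.split? s ".").getD []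
  ((List.range' 2 (pieces.length - 1)).reverse).map (fun i => PySem.Str.join "." (pieces.take i))

-- The dict key at which the descent from s stops and jumps (none = the walk halts at s's chain).
def pvDescentKey (lineage_to_parent_dict : List (String × String)) (s : String) : Option String :=
  match (pvPrefixes s).find? (fun t => (PySem.Dict.mk lineage_to_parent_dict).contains t) with
  | some t => if ((PySem.Dict.mk lineage_to_parent_dict).get? t).getD "" = "" then none else some t
  | none => none

def pvStep (lineage_to_parent_dict : List (String × String)) : Option String → Option String
  | none => none
  | some k => pvDescentKey lineage_to_parent_dict (((PySem.Dict.mk lineage_to_parent_dict).get? k).getD "")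

-- Pre_ excludes (a) association lists with duplicate keys — a Python dict cannot carry
-- them and the assoc-list first-match convention and Python's last-wins overwrite
-- disagree there — and (b) exactly the inputs whose parent chain from an_alias cycles
-- through the dict forever: there Python A raises RecursionError (and Python B's loop
-- does not terminate). A halting chain visits each dict key at most once, so it halts
-- within length+1 jumps; the iterate condition is exactly "A returns normally".
def Pre_get_lineage_from_alias_py (an_alias : String) (lineage_to_parent_dict : List (String × String)) : Prop :=
  (lineage_to_parent_dict.map Prod.fst).Nodup ∧
  (pvStep lineage_to_parent_dict)^[lineage_to_parent_dict.length + 1] (pvDescentKey lineage_to_parent_dict an_alias) = none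
instance (an_alias : String) (lineage_to_parent_dict : List (String × String)) : Decidable (Pre_get_lineage_from_alias_py an_alias lineage_to_parent_dict) := by unfold Pre_get_lineage_from_alias_py; infer_instance

def pvWitness_get_lineage_from_alias_py : String × (List (String × String)) :=
  ("XBB.1.5", [("XBB.1", "BA.2.75.3.1.1.1"), ("BA", "")])

def Spec_get_lineage_from_alias_py (an_alias : String) (lineage_to_parent_dict : List (String × String)) (out : String) : Prop := out = get_lineage_from_alias_py_alt an_alias lineage_to_parent_dict
instance (an_alias : String) (lineage_to_parent_dict : List (String × String)) (out : String) : Decidable (Spec_get_lineage_from_alias_py an_alias lineage_to_parent_dict out) := by unfold Spec_get_lineage_from_alias_py; infer_instance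

-- ===== CLAIM (what is proved, stated in full; the proofs are below) =====
def Claim_equal_get_lineage_from_alias_py : Prop := ∀ (an_alias : String) (lineage_to_parent_dict : List (String × String)), Dom_get_lineage_from_alias_py an_alias lineage_to_parent_dict → Pre_get_lineage_from_alias_py an_alias lineage_to_parent_dict → Spec_get_lineage_from_alias_py an_alias lineage_to_parent_dict (get_lineage_from_alias_py an_alias lineage_to_parent_dict)

-- ===== LEMMAS AND PROOFS =====

-- join "." flattens a two-element join at the head of a longer join.
theorem pvJoin_glue (x y : String) (l : List String) :
    PySem.Str.join "." (PySem.Str.join "." [x, y] :: l) = PySem.Str.join "." (x :: y :: l) := by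
  apply String.toList_inj.mp
  cases l with
  | nil => simp [PySem.Str.toList_join, PySem.Chars.join_singleton, PySem.Chars.join_cons_cons]
  | cons z t => simp [PySem.Str.toList_join, PySem.Chars.join_cons_cons]

theorem pvJoin_single (x : String) : PySem.Str.join "." [x] = x := by
  apply String.toList_inj.mp
  simp [PySem.Str.toList_join, PySem.Chars.join_singleton]

-- Loop invariant: joining B's loop state equals joining A's result with the pending suffixes,
-- for EVERY fuel (the fuel-0 defaults align on both sides).
theorem pvInvariant (dl : List (String × String)) (fuel : Nat) :
    ∀ (current : String) (acc : List String),
      PySem.Str.join "." ((pvBloop dl fuel current acc).1 :: (pvBloop dl fuel current acc).2.reverse)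
        = PySem.Str.join "." (pvAgo dl fuel current :: acc.reverse) := by
  induction fuel with
  | zero => intro current acc; rfl
  | succ n ih =>
    intro current acc
    simp only [pvBloop, pvAgo]
    by_cases h1 : ((PySem.Str.split? current ".").getD []).length = 1
    · simp [h1]
    · by_cases hc : (PySem.Dict.mk dl).contains current
      · by_cases he : ((PySem.Dict.mk dl).get? current).getD "" = ""
        · simp [h1, hc, he]
        · simp only [h1, hc, he, if_false, if_true, and_false]
          rw [ih, pvJoin_glue]
          simp
      · have hc' : ({ items := dl } : PySem.Dict String String).contains current = false :=
          Bool.not_eq_true _ ▸ (by simpa using hc)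
        simp only [h1, hc', if_false, Bool.false_eq_true, false_and]
        rw [ih, pvJoin_glue]
        simp

-- ===== VERDICT (by name: the statement is the Claim_ definition above) =====
theorem get_lineage_from_alias_py_spec : Claim_equal_get_lineage_from_alias_py := by
  intro an_alias dl _ _
  unfold Spec_get_lineage_from_alias_py get_lineage_from_alias_py get_lineage_from_alias_py_alt
  simp only [PySem.List.slice?_none_none_neg_one, Option.getD_some]
  have h := pvInvariant dl
    (PySem.Str.count an_alias "." + 1 + dl.foldl (fun acc p => acc + PySem.Str.count p.2 "." + 1) 0)
    an_alias []
  simp only [List.reverse_nil] at h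
  rw [pvJoin_single] at h
  exact h.symm
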